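-- pv_equiv track=rewrite | github.com/ubvu/wibt-tool | src/utils/json_helper.py | find_json_markers
-- ===== SOURCE A (Python) =====
-- from typing import Any, Dict, List, Optional, Union
--
-- def find_json_markers(text: str) -> List[int]:
--     """
--     Find all JSON object markers in text (braces that look like JSON objects).
--
--     Args:
--         text: Input text to search for JSON markers
--
--     Returns:
--         List of starting indices of JSON-like structures
--     """
--     markers = []
--     i = 0
--     while i < len(text):
--         if text[i] == "{":
--             # Try to find a matching closing brace
--             brace_count = 0
--             j = i
--             while j < len(text):
--                 if text[j] == "{":
--                     brace_count += 1
--                 elif text[j] == "}":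
--                     brace_count -= 1
--                     if brace_count == 0:
--                         markers.append(i)
--                         break
--                 j += 1
--         i += 1
--     return markers
-- ===== SOURCE B (Python) =====
-- from typing import List
--
-- def find_json_markers(text: str) -> List[int]:
--     """
--     Find all JSON object markers in text (braces that look like JSON objects).
--
--     One backward pass: m is the minimum prefix-sum (opens minus closes) of the
--     suffix after the current position; a '{' at k has a matching close iff m <= -1.
--     """
--     res = []
--     m = 0
--     for k in range(len(text) - 1, -1, -1):
--         ch = text[k]
--         if ch == "{":
--             if m <= -1:
--                 res.append(k)
--             m = min(0, 1 + m)
--         elif ch == "}":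
--             m = min(0, -1 + m)
--     return res[::-1]
-- ===== Notes on version B (the rewrite author's own statement) =====
-- stated objective: faster
-- what changed: Replaced the nested rescan (for every '{' a fresh forward scan counting braces) by a single backward pass maintaining the minimum prefix-sum of brace depth of the remaining suffix; a '{' is matched iff that minimum is <= -1.
import Mathlib
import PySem

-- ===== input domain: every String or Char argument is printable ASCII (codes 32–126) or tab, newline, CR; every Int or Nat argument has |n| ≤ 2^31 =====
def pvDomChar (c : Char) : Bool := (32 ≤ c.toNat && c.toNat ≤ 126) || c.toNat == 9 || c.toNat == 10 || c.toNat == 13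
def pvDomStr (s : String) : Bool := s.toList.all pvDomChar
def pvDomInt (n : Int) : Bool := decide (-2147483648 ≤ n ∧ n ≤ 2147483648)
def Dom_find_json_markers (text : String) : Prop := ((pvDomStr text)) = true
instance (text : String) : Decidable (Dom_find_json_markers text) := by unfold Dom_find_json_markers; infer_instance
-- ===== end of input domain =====

-- B replaces A's quadratic rescan-per-'{' by one linear backward pass over the text.

-- ===== PORT A =====
-- inner while-loop of A: scan from position j with running brace_count c;
-- returns true iff the count reaches 0 on a '}' (A then records the start index)
def findCloseA (c : Int) (l : List Char) : Bool :=
  match l with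
  | [] => false
  | ch :: t =>
    if ch = '{' then findCloseA (c + 1) t
    else if ch = '}' then (if c - 1 = 0 then true else findCloseA (c - 1) t)
    else findCloseA c t

-- outer while-loop of A: at each index i with text[i] = '{', run the inner scan from i
def outerA (cs : List Char) (i : Int) : List Int :=
  match cs with
  | [] => []
  | ch :: t =>
    if ch = '{' then
      (if findCloseA 0 (ch :: t) then i :: outerA t (i + 1) else outerA t (i + 1))
    else outerA t (i + 1)

def find_json_markers (text : String) : List Int := outerA text.toList 0

-- ===== PORT B =====
-- backward pass of Source B: processes the suffix starting at index k; returns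
-- (m, res) where m is the minimum prefix-sum of brace depth of that suffix and
-- res the matched '{' indices in it (Source B appends right-to-left and reverses;
-- here the recursion builds the same increasing-order list directly)
def goB (cs : List Char) (k : Int) : Int × List Int :=
  match cs with
  | [] => (0, [])
  | ch :: t =>
    let (m, r) := goB t (k + 1)
    if ch = '{' then (min 0 (1 + m), if m ≤ -1 then k :: r else r)
    else if ch = '}' then (min 0 (-1 + m), r)
    else (m, r)

def find_json_markers_alt (text : String) : List Int := (goB text.toList 0).2

-- ===== PRECONDITION & SPEC =====
def Spec_find_json_markers (text : String) (out : List Int) : Prop := out = find_json_markers_alt text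
instance (text : String) (out : List Int) : Decidable (Spec_find_json_markers text out) := by unfold Spec_find_json_markers; infer_instance

-- ===== CLAIM (what is proved, stated in full; the proofs are below) =====
def Claim_equal_find_json_markers : Prop := ∀ (text : String), Dom_find_json_markers text → Spec_find_json_markers text (find_json_markers text)

-- ===== LEMMAS AND PROOFS =====

-- minimum, over all prefixes p of l, of (# '{' in p) - (# '}' in p)
def minPre (l : List Char) : Int :=
  match l with
  | [] => 0
  | ch :: t =>
    if ch = '{' then min 0 (1 + minPre t)
    else if ch = '}' then min 0 (-1 + minPre t)
    else minPre t

theorem minPre_nonpos (l : List Char) : minPre l ≤ 0 := by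
  induction l with
  | nil => simp [minPre]
  | cons ch t ih => simp only [minPre]; split_ifs <;> omega

theorem findCloseA_eq (l : List Char) : ∀ c : Int, 1 ≤ c →
    findCloseA c l = decide (c + minPre l ≤ 0) := by
  induction l with
  | nil => intro c hc; simp [findCloseA, minPre]; omega
  | cons ch t ih =>
    intro c hc
    simp only [findCloseA, minPre]
    split_ifs with h1 h2 h3
    · rw [ih (c + 1) (by omega)]
      simp only [decide_eq_decide]; omega
    · have hm := minPre_nonpos t
      have : c + min 0 (-1 + minPre t) ≤ 0 := by omega
      simp [this]
    · rw [ih (c - 1) (by omega)]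
      simp only [decide_eq_decide]; omega
    · rw [ih c hc]

theorem goB_fst (cs : List Char) : ∀ k : Int, (goB cs k).1 = minPre cs := by
  induction cs with
  | nil => intro k; simp [goB, minPre]
  | cons ch t ih =>
    intro k
    simp only [goB, minPre, ih (k + 1)]
    split_ifs <;> rfl

theorem goB_eq_outerA (cs : List Char) : ∀ k : Int, (goB cs k).2 = outerA cs k := by
  induction cs with
  | nil => intro k; simp [goB, outerA]
  | cons ch t ih =>
    intro k
    simp only [goB, outerA, ih (k + 1), goB_fst]
    by_cases h1 : ch = '{'
    · subst h1
      have hf : findCloseA 0 ('{' :: t) = decide (1 + minPre t ≤ 0) := by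
        simp only [findCloseA]
        rw [findCloseA_eq t (0 + 1) (by omega)]
        norm_num
      by_cases h : minPre t ≤ -1
      · simp [hf, h, show 1 + minPre t ≤ 0 by omega]
      · simp [hf, h, show ¬(1 + minPre t ≤ 0) by omega]
    · rw [if_neg h1, if_neg h1]
      split_ifs <;> rfl

-- ===== VERDICT (by name: the statement is the Claim_ definition above) =====
theorem find_json_markers_spec : Claim_equal_find_json_markers := by
  intro text _
  unfold Spec_find_json_markers find_json_markers find_json_markers_alt
  exact (goB_eq_outerA text.toList 0).symm
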